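-- pv_equiv track=rewrite | github.com/humilityisavirtue-collab/openpod | src/openpod/router.py | _classify_suit
-- ===== SOURCE A (Python) =====
-- SUIT_KEYWORDS = {
--     "hearts": {
--         "love", "feel", "emotion", "relationship", "friend", "family", "care",
--         "empathy", "connection", "trust", "grateful", "lonely", "sad", "happy",
--         "hurt", "kind", "forgive", "miss", "bond", "intimacy", "compassion",
--         "jealous", "affection", "warmth", "loss", "grief", "joy", "partner",
--     },
--     "spades": {
--         "think", "analyze", "reason", "logic", "truth", "understand", "explain",
--         "compare", "evaluate", "argument", "debate", "prove", "theory", "why",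
--         "paradox", "conflict", "strategy", "puzzle", "riddle", "solve", "math",
--         "philosophy", "science", "research", "hypothesis", "evidence", "mind",
--     },
--     "diamonds": {
--         "build", "make", "create", "code", "implement", "deploy", "ship",
--         "money", "budget", "cost", "price", "material", "body", "health",
--         "food", "exercise", "house", "tool", "fix", "repair", "construct",
--         "practical", "concrete", "tangible", "physical", "hardware", "craft",
--     },
--     "clubs": {
--         "do", "act", "start", "launch", "push", "move", "energy", "will",
--         "power", "force", "drive", "motivation", "initiative", "bold",
--         "courage", "dare", "fight", "challenge", "compete", "win", "lead",
--         "decide", "commit", "execute", "hustle", "grind", "ambition",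
--     },
-- }
--
-- def _classify_suit(words: set) -> str:
--     scores = {}
--     for suit, keywords in SUIT_KEYWORDS.items():
--         overlap = len(words & keywords)
--         if overlap > 0:
--             scores[suit] = overlap
--     if scores:
--         return max(scores, key=scores.get)
--     return "spades"  # default: analytical
-- ===== SOURCE B (Python) =====
-- SUIT_KEYWORDS = {
--     "hearts": {
--         "love", "feel", "emotion", "relationship", "friend", "family", "care",
--         "empathy", "connection", "trust", "grateful", "lonely", "sad", "happy",
--         "hurt", "kind", "forgive", "miss", "bond", "intimacy", "compassion",
--         "jealous", "affection", "warmth", "loss", "grief", "joy", "partner",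
--     },
--     "spades": {
--         "think", "analyze", "reason", "logic", "truth", "understand", "explain",
--         "compare", "evaluate", "argument", "debate", "prove", "theory", "why",
--         "paradox", "conflict", "strategy", "puzzle", "riddle", "solve", "math",
--         "philosophy", "science", "research", "hypothesis", "evidence", "mind",
--     },
--     "diamonds": {
--         "build", "make", "create", "code", "implement", "deploy", "ship",
--         "money", "budget", "cost", "price", "material", "body", "health",
--         "food", "exercise", "house", "tool", "fix", "repair", "construct",
--         "practical", "concrete", "tangible", "physical", "hardware", "craft",
--     },
--     "clubs": {
--         "do", "act", "start", "launch", "push", "move", "energy", "will",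
--         "power", "force", "drive", "motivation", "initiative", "bold",
--         "courage", "dare", "fight", "challenge", "compete", "win", "lead",
--         "decide", "commit", "execute", "hustle", "grind", "ambition",
--     },
-- }
--
-- # Inverted index built once: each keyword maps to the suit that owns it
-- # (the four keyword sets are pairwise disjoint, so each word has one suit).
-- _WORD_TO_SUIT = {w: suit for suit, kws in SUIT_KEYWORDS.items() for w in kws}
--
-- def _classify_suit(words: set) -> str:
--     # Project the words through the inverted index, tally per-suit counts
--     # in one dict, then pick the winner by an ordered strict-max scan
--     # (strictly-greater keeps the first suit in SUIT_KEYWORDS order,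
--     # matching max(key=...); the "spades"/0 seed is the all-zero default).
--     hits = [_WORD_TO_SUIT[w] for w in words if w in _WORD_TO_SUIT]
--     counts = {}
--     for s in hits:
--         counts[s] = counts.get(s, 0) + 1
--     best, best_n = "spades", 0
--     for suit in SUIT_KEYWORDS:
--         n = counts.get(suit, 0)
--         if n > best_n:
--             best, best_n = suit, n
--     return best
-- ===== Notes on version B (the rewrite author's own statement) =====
-- stated objective: alternative
-- what changed: Replaces A's suit-major pass (four set intersections feeding a dict of positive scores and max(key=scores.get)) by an inverted keyword-to-suit index built once at module level, a word-major projection of the input through that index with a per-suit tally dict, and an ordered strict-max scan that reproduces max's first-in-order tie-break and the all-zero 'spades' default.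
import Mathlib
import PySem

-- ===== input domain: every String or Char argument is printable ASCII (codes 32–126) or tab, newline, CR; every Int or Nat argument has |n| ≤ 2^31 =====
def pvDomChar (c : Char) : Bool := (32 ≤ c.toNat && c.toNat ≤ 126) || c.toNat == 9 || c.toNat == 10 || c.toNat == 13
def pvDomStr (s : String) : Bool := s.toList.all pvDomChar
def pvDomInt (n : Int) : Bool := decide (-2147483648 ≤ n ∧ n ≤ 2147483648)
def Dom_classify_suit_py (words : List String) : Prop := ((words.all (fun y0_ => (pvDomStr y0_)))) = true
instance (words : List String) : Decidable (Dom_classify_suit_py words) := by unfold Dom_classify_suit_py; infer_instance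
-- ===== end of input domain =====

-- B replaces A's suit-major pass (four set intersections, a dict of positive scores,
-- max(key=scores.get)) by an inverted keyword->suit index built once, a word-major tally
-- of per-suit counts through that index, and an ordered strict-max scan; objective: alternative.


-- ===== PORT A =====
-- The four keyword sets (Python set literals: only membership and intersection size are
-- used by either program, so the element order of these lists is irrelevant; alphabetical).
def kwHearts : List String := ["affection", "bond", "care", "compassion", "connection", "emotion", "empathy", "family", "feel", "forgive", "friend", "grateful", "grief", "happy", "hurt", "intimacy", "jealous", "joy", "kind", "lonely", "loss", "love", "miss", "partner", "relationship", "sad", "trust", "warmth"]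
def kwSpades : List String := ["analyze", "argument", "compare", "conflict", "debate", "evaluate", "evidence", "explain", "hypothesis", "logic", "math", "mind", "paradox", "philosophy", "prove", "puzzle", "reason", "research", "riddle", "science", "solve", "strategy", "theory", "think", "truth", "understand", "why"]
def kwDiamonds : List String := ["body", "budget", "build", "code", "concrete", "construct", "cost", "craft", "create", "deploy", "exercise", "fix", "food", "hardware", "health", "house", "implement", "make", "material", "money", "physical", "practical", "price", "repair", "ship", "tangible", "tool"]
def kwClubs : List String := ["act", "ambition", "bold", "challenge", "commit", "compete", "courage", "dare", "decide", "do", "drive", "energy", "execute", "fight", "force", "grind", "hustle", "initiative", "launch", "lead", "motivation", "move", "power", "push", "start", "will", "win"]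

-- SUIT_KEYWORDS in insertion order.
def suitKeywords : List (String × List String) :=
  [("hearts", kwHearts), ("spades", kwSpades), ("diamonds", kwDiamonds), ("clubs", kwClubs)]

-- Transliteration of _classify_suit: build the scores dict over suits in order
-- (the keys are the four distinct suit names, so each dict insert appends a fresh key;
-- len(words & keywords) = number of keywords that are in words), then
-- max(scores, key=scores.get): the first key with maximal value, in insertion order.
def classify_suit_py (words : List String) : String :=
  let scores : List (String × Nat) :=
    suitKeywords.foldl
      (fun (scores : List (String × Nat)) (p : String × List String) =>
        let overlap := (p.2.filter (fun k => words.contains k)).length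
        if overlap > 0 then scores ++ [(p.1, overlap)] else scores) []
  match scores with
  | [] => "spades"
  | (k, v) :: rest =>
      (rest.foldl (fun (best : String × Nat) (q : String × Nat) =>
        if q.2 > best.2 then q else best) (k, v)).1

-- ===== PORT B =====
-- _WORD_TO_SUIT: the inverted index, built once by the module-level dict comprehension
-- (keys are the 109 pairwise-distinct keywords, so insertion never overwrites: the dict
-- is exactly this association list).
def wordToSuit : PySem.Dict String String :=
  PySem.Dict.mk ((kwHearts.map (fun k => (k, "hearts")))
    ++ (kwSpades.map (fun k => (k, "spades")))
    ++ (kwDiamonds.map (fun k => (k, "diamonds")))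
    ++ (kwClubs.map (fun k => (k, "clubs"))))

-- Transliteration of Source B's _classify_suit: hits comprehension (the `if w in d` guard
-- plus `d[w]` is exactly filterMap of get?), counts tally, ordered strict-max scan.
def classify_suit_py_alt (words : List String) : String :=
  let hits : List String := words.filterMap (fun w => wordToSuit.get? w)
  let counts : PySem.Dict String Int :=
    hits.foldl (fun (d : PySem.Dict String Int) s => d.insert s (d.getD s 0 + 1)) PySem.Dict.empty
  let best :=
    (["hearts", "spades", "diamonds", "clubs"]).foldl
      (fun (best : String × Int) suit =>
        let n := counts.getD suit 0
        if n > best.2 then (suit, n) else best) ("spades", 0)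
  best.1

-- ===== PRECONDITION & SPEC =====
-- The Python parameter is a set; per the type convention the list holds its DISTINCT
-- elements, so Pre_ states exactly that encoding condition (no input of the Python
-- function is excluded: every set corresponds to a duplicate-free list).
def Pre_classify_suit_py (words : List String) : Prop := words.Nodup
instance (words : List String) : Decidable (Pre_classify_suit_py words) := by
  unfold Pre_classify_suit_py; infer_instance
def pvWitness_classify_suit_py : List String := ["love", "win", "xyz"]
def Spec_classify_suit_py (words : List String) (out : String) : Prop := out = classify_suit_py_alt words
instance (words : List String) (out : String) : Decidable (Spec_classify_suit_py words out) := by unfold Spec_classify_suit_py; infer_instance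

-- ===== CLAIM (what is proved, stated in full; the proofs are below) =====
def Claim_equal_classify_suit_py : Prop := ∀ (words : List String), Dom_classify_suit_py words → Pre_classify_suit_py words → Spec_classify_suit_py words (classify_suit_py words)

-- ===== LEMMAS AND PROOFS =====

-- Intersection size can be counted from either side when both lists are duplicate-free.
lemma filter_length_swap (l₁ l₂ : List String) (h₁ : l₁.Nodup) (h₂ : l₂.Nodup) :
    (l₁.filter (fun k => l₂.contains k)).length = (l₂.filter (fun k => l₁.contains k)).length := by
  rw [← List.toFinset_card_of_nodup (h₁.filter _), ← List.toFinset_card_of_nodup (h₂.filter _)]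
  congr 1
  rw [List.toFinset_filter, List.toFinset_filter]
  ext x
  simp
  tauto

-- Looking up a key in a literal dict whose first block maps every element of l to c.
lemma get_mk_map_const (l : List String) (c : String) (rest : List (String × String)) (w : String) :
    (PySem.Dict.mk ((l.map (fun k => (k, c))) ++ rest)).get? w
      = if w ∈ l then some c else (PySem.Dict.mk rest).get? w := by
  induction l with
  | nil => simp
  | cons x tl ih =>
      rw [List.map_cons, List.cons_append, PySem.Dict.get?_mk_cons, ih]
      by_cases hx : x = w
      · subst hx; simp
      · have hb : (x == w) = false := by simp [hx]
        rw [hb]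
        have hiff : (w = x ∨ w ∈ tl) ↔ w ∈ tl := or_iff_right (fun h : w = x => hx h.symm)
        simp [List.mem_cons, hiff]

-- The inverted index sends a word to the suit whose keyword list contains it.
lemma wordToSuit_get (w : String) :
    wordToSuit.get? w
      = if w ∈ kwHearts then some "hearts"
        else if w ∈ kwSpades then some "spades"
        else if w ∈ kwDiamonds then some "diamonds"
        else if w ∈ kwClubs then some "clubs"
        else none := by
  unfold wordToSuit
  rw [List.append_assoc, List.append_assoc, get_mk_map_const, get_mk_map_const,
    get_mk_map_const,
    show (kwClubs.map (fun k => (k, "clubs"))) = (kwClubs.map (fun k => (k, "clubs"))) ++ [] by simp,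
    get_mk_map_const]
  rfl

-- Counting one value in the projection through an Option-valued map.
lemma count_filterMap (f : String → Option String) (l : List String) (c : String) :
    (l.filterMap f).count c = (l.filter (fun a => f a == some c)).length := by
  induction l with
  | nil => rfl
  | cons x tl ih =>
      rw [List.filterMap_cons, List.filter_cons]
      cases hfx : f x with
      | none => simpa [hfx] using ih
      | some v =>
          by_cases hv : v = c
          · subst hv; simp [List.count_cons, ih]
          · simp [List.count_cons, hv, ih]

-- B's hit count for a given suit equals the number of words in that suit's keyword list.
lemma hits_count (words : List String) (kw : List String) (suit : String)
    (h : ∀ w, wordToSuit.get? w = some suit ↔ w ∈ kw) :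
    (words.filterMap (fun w => wordToSuit.get? w)).count suit
      = (words.filter (fun w => kw.contains w)).length := by
  rw [count_filterMap]
  congr 1
  apply List.filter_congr
  intro w _
  by_cases hw : w ∈ kw
  · simp [hw, (h w).2 hw]
  · have hne : wordToSuit.get? w ≠ some suit := fun hc => hw ((h w).1 hc)
    simp [hw, hne]

-- Each suit's preimage under the index is exactly its own keyword list
-- (the four keyword lists are pairwise disjoint, checked by decide).
lemma iff_hearts (w : String) : wordToSuit.get? w = some "hearts" ↔ w ∈ kwHearts := by
  rw [wordToSuit_get w]
  constructor
  · intro hx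
    split_ifs at hx with h1 h2 h3 h4
    · exact h1
    · exact absurd (Option.some.inj hx) (by decide)
    · exact absurd (Option.some.inj hx) (by decide)
    · exact absurd (Option.some.inj hx) (by decide)
  · intro hw
    rw [if_pos hw]

lemma iff_spades (w : String) : wordToSuit.get? w = some "spades" ↔ w ∈ kwSpades := by
  have hd : ∀ x ∈ kwSpades, x ∉ kwHearts := by decide
  rw [wordToSuit_get w]
  constructor
  · intro hx
    split_ifs at hx with h1 h2 h3 h4
    · exact absurd (Option.some.inj hx) (by decide)
    · exact h2
    · exact absurd (Option.some.inj hx) (by decide)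
    · exact absurd (Option.some.inj hx) (by decide)
  · intro hw
    rw [if_neg (fun h1 => hd w hw h1), if_pos hw]

lemma iff_diamonds (w : String) : wordToSuit.get? w = some "diamonds" ↔ w ∈ kwDiamonds := by
  have hd1 : ∀ x ∈ kwDiamonds, x ∉ kwHearts := by decide
  have hd2 : ∀ x ∈ kwDiamonds, x ∉ kwSpades := by decide
  rw [wordToSuit_get w]
  constructor
  · intro hx
    split_ifs at hx with h1 h2 h3 h4
    · exact absurd (Option.some.inj hx) (by decide)
    · exact absurd (Option.some.inj hx) (by decide)
    · exact h3
    · exact absurd (Option.some.inj hx) (by decide)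
  · intro hw
    rw [if_neg (fun h1 => hd1 w hw h1), if_neg (fun h2 => hd2 w hw h2), if_pos hw]

lemma iff_clubs (w : String) : wordToSuit.get? w = some "clubs" ↔ w ∈ kwClubs := by
  have hd1 : ∀ x ∈ kwClubs, x ∉ kwHearts := by decide
  have hd2 : ∀ x ∈ kwClubs, x ∉ kwSpades := by decide
  have hd3 : ∀ x ∈ kwClubs, x ∉ kwDiamonds := by decide
  rw [wordToSuit_get w]
  constructor
  · intro hx
    split_ifs at hx with h1 h2 h3 h4
    · exact absurd (Option.some.inj hx) (by decide)
    · exact absurd (Option.some.inj hx) (by decide)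
    · exact absurd (Option.some.inj hx) (by decide)
    · exact h4
  · intro hw
    rw [if_neg (fun h1 => hd1 w hw h1), if_neg (fun h2 => hd2 w hw h2),
      if_neg (fun h3 => hd3 w hw h3), if_pos hw]

-- The tallied count of a suit, read back from B's counts dict.
lemma counts_getD (ws : List String) (kw : List String) (suit : String)
    (hiff : ∀ w, wordToSuit.get? w = some suit ↔ w ∈ kw) :
    ((ws.filterMap (fun w => wordToSuit.get? w)).foldl
        (fun (d : PySem.Dict String Int) s => d.insert s (d.getD s 0 + 1)) PySem.Dict.empty).getD suit 0
      = ((ws.filter (fun w => kw.contains w)).length : Int) := by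
  rw [PySem.Dict.getD_foldl_insert_add_one, hits_count ws kw suit hiff]
  simp

-- ===== VERDICT (by name: the statement is the Claim_ definition above) =====
set_option maxHeartbeats 1000000 in
theorem classify_suit_py_spec : Claim_equal_classify_suit_py := by
  intro ws _ h
  show classify_suit_py ws = classify_suit_py_alt ws
  have hH : kwHearts.Nodup := by decide
  have hS : kwSpades.Nodup := by decide
  have hD : kwDiamonds.Nodup := by decide
  have hC : kwClubs.Nodup := by decide
  have eH := filter_length_swap kwHearts ws hH h
  have eS := filter_length_swap kwSpades ws hS h
  have eD := filter_length_swap kwDiamonds ws hD h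
  have eC := filter_length_swap kwClubs ws hC h
  unfold classify_suit_py classify_suit_py_alt
  simp only [suitKeywords, List.foldl, eH, eS, eD, eC,
    counts_getD ws kwHearts "hearts" iff_hearts,
    counts_getD ws kwSpades "spades" iff_spades,
    counts_getD ws kwDiamonds "diamonds" iff_diamonds,
    counts_getD ws kwClubs "clubs" iff_clubs]
  generalize (ws.filter (fun w => kwHearts.contains w)).length = a
  generalize (ws.filter (fun w => kwSpades.contains w)).length = b
  generalize (ws.filter (fun w => kwDiamonds.contains w)).length = c
  generalize (ws.filter (fun w => kwClubs.contains w)).length = d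
  split_ifs <;> simp <;> (try split_ifs) <;> try rfl
  all_goals (simp_all; try omega)
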